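-- pv_equiv track=rewrite | github.com/nikolasavic/algorithms | dynamic_programming/jumping_frog.py | grid_frog
-- ===== SOURCE A (Python) =====
-- def grid_frog(n):
--     # Jumps:
--     # i, j -> i + 1, j + 2
--     # i, j -> i + 2, j + 1
--     T = [[0 for _ in range(n + 1)] for _ in range(n + 1)]
--     T[1][1] = 1
--
--     for i in range(1, n + 1):
--         for j in range(1, n + 1):
--             if i > 1 and j > 1:
--                 T[i][j] = T[i - 1][j - 2] + T[i - 2][j - 1]
--
--     return T[n][n]
-- ===== SOURCE B (Python) =====
-- import math
--
-- def grid_frog(n):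
--     # Each jump advances i+j by 3, so a path to (n, n) uses a jumps of each
--     # kind where a = (n - 1) / 3; the answer is the binomial C(2a, a).
--     if (n - 1) % 3 != 0:
--         return 0
--     a = (n - 1) // 3
--     return math.comb(2 * a, a)
-- ===== Notes on version B (the rewrite author's own statement) =====
-- stated objective: faster
-- what changed: Replaced the O(n^2) dynamic-programming table with a closed form: both jump kinds advance i+j by three, so paths to (n,n) exist only when n-1 is divisible by three and use a = (n-1)//3 jumps of each kind, giving C(2a, a) paths (computed directly by math.comb).
import Mathlib
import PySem

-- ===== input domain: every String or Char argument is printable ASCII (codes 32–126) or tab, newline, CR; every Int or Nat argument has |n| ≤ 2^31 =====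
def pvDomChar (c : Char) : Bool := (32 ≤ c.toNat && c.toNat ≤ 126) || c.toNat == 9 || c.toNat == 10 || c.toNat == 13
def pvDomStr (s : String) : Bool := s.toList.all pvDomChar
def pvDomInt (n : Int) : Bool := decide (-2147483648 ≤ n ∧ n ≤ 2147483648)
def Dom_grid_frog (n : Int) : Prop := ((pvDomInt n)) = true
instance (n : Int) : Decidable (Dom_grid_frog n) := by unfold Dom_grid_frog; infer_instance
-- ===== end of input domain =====

-- B replaces A's O(n^2) DP table with the closed form C(2a, a), a = (n-1)//3 (0 when 3 does not divide n-1).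

-- ===== PORT A =====
-- T[i][j] (row lookup then element lookup; all indices used under Pre_ are in range)
def pvGet2 (T : List (List Int)) (i j : Int) : Int :=
  PySem.List.pyGetD (PySem.List.pyGetD T i []) j 0

-- T[i][j] = v (fetch row i, set element j, store the row back)
def pvSet2 (T : List (List Int)) (i j : Int) (v : Int) : List (List Int) :=
  PySem.List.pySetD T i (PySem.List.pySetD (PySem.List.pyGetD T i []) j v)

def grid_frog (n : Int) : Int :=
  let T0 : List (List Int) :=
    (PySem.List.pyRange 0 (n + 1) 1).map
      (fun _ => (PySem.List.pyRange 0 (n + 1) 1).map (fun _ => (0 : Int)))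
  let T1 := pvSet2 T0 1 1 1
  let T2 := (PySem.List.pyRange 1 (n + 1) 1).foldl (fun T i =>
      (PySem.List.pyRange 1 (n + 1) 1).foldl (fun T j =>
        if 1 < i ∧ 1 < j then
          pvSet2 T i j (pvGet2 T (i - 1) (j - 2) + pvGet2 T (i - 2) (j - 1))
        else T) T) T1
  pvGet2 T2 n n

-- ===== PORT B =====
def grid_frog_alt (n : Int) : Int :=
  if PySem.Int.mod (n - 1) 3 ≠ 0 then 0
  else
    let a := PySem.Int.floordiv (n - 1) 3
    ((2 * a).toNat.choose a.toNat : Int)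

-- ===== PRECONDITION & SPEC =====
-- A builds an (n+1)×(n+1) table and reads T[1][1] and T[n][n]: it raises IndexError for every n ≤ 0.
def Pre_grid_frog (n : Int) : Prop := 1 ≤ n
instance (n : Int) : Decidable (Pre_grid_frog n) := by unfold Pre_grid_frog; infer_instance
def pvWitness_grid_frog : Int := (4)

def Spec_grid_frog (n : Int) (out : Int) : Prop := out = grid_frog_alt n
instance (n : Int) (out : Int) : Decidable (Spec_grid_frog n out) := by unfold Spec_grid_frog; infer_instance

-- ===== CLAIM (what is proved, stated in full; the proofs are below) =====
def Claim_equal_grid_frog : Prop := ∀ (n : Int), Dom_grid_frog n → Pre_grid_frog n → Spec_grid_frog n (grid_frog n)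

-- ===== LEMMAS AND PROOFS =====

-- The recursive value A's dynamic program assigns to table cell (i, j).
def pvG (i j : Int) : Int :=
  if i = 1 ∧ j = 1 then 1
  else if 1 < i ∧ 1 < j then pvG (i - 1) (j - 2) + pvG (i - 2) (j - 1)
  else 0
termination_by (i + j).toNat
decreasing_by all_goals omega


-- Closed form for pvG: x = (2j-i-1)/3 jumps of kind (+1,+2) and y = (2i-j-1)/3 of kind (+2,+1),
-- C(x+y, x) paths when both counts are nonnegative integers, else 0.
def pvF (i j : Int) : Int :=
  if 3 ∣ (2 * j - i - 1) ∧ 0 ≤ 2 * j - i - 1 ∧ 0 ≤ 2 * i - j - 1 then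
    ((((2 * j - i - 1) / 3) + ((2 * i - j - 1) / 3)).toNat.choose ((2 * j - i - 1) / 3).toNat : Int)
  else 0
lemma pvF_of_div {i j x y : Int} (hx : 2 * j - i - 1 = 3 * x) (hy : 2 * i - j - 1 = 3 * y)
    (hx0 : 0 ≤ x) (hy0 : 0 ≤ y) : pvF i j = ((x + y).toNat.choose x.toNat : Int) := by
  unfold pvF
  rw [if_pos ⟨⟨x, hx⟩, by omega, by omega⟩, hx, hy,
    Int.mul_ediv_cancel_left x (by norm_num), Int.mul_ediv_cancel_left y (by norm_num)]
lemma pvF_of_not_div {i j : Int} (h : ¬ (3 ∣ (2 * j - i - 1))) : pvF i j = 0 := by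
  unfold pvF; rw [if_neg (by tauto)]
lemma pvF_of_neg {i j : Int} (h : 2 * j - i - 1 < 0 ∨ 2 * i - j - 1 < 0) : pvF i j = 0 := by
  unfold pvF; rw [if_neg (by omega)]


lemma pvG_eq_pvF (i j : Int) : pvG i j = pvF i j := by
  have H : ∀ m : Nat, ∀ i j : Int, (i + j).toNat < m → pvG i j = pvF i j := by
    intro m
    induction m with
    | zero => intro i j h; omega
    | succ m ih =>
      intro i j hm
      rw [pvG]
      by_cases h11 : i = 1 ∧ j = 1
      · rw [if_pos h11]
        obtain ⟨rfl, rfl⟩ := h11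
        rw [pvF_of_div (x := 0) (y := 0) (by ring) (by ring) le_rfl le_rfl]; rfl
      · rw [if_neg h11]
        by_cases hgt : 1 < i ∧ 1 < j
        · rw [if_pos hgt]
          obtain ⟨hi, hj⟩ := hgt
          rw [ih (i - 1) (j - 2) (by omega), ih (i - 2) (j - 1) (by omega)]
          by_cases hd : (3 : Int) ∣ 2 * j - i - 1
          · obtain ⟨x, hx⟩ := hd
            have hy : 2 * i - j - 1 = 3 * (x - j + i) := by omega
            set y := x - j + i with hydef
            rcases lt_or_ge x 0 with hx0 | hx0
            · rw [pvF_of_neg (i := i) (j := j) (by omega),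
                pvF_of_neg (i := i - 1) (j := j - 2) (by left; omega),
                pvF_of_neg (i := i - 2) (j := j - 1) (by left; omega)]
              norm_num
            · rcases lt_or_ge y 0 with hy0 | hy0
              · rw [pvF_of_neg (i := i) (j := j) (by omega),
                  pvF_of_neg (i := i - 1) (j := j - 2) (by right; omega),
                  pvF_of_neg (i := i - 2) (j := j - 1) (by right; omega)]
                norm_num
              · -- x ≥ 0, y ≥ 0
                rcases eq_or_lt_of_le hx0 with hx1 | hx1
                · -- x = 0
                  have hy1 : 1 ≤ y := by omega
                  rw [pvF_of_div (i := i) (j := j) hx hy hx0 hy0,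
                    pvF_of_neg (i := i - 1) (j := j - 2) (by left; omega),
                    pvF_of_div (i := i - 2) (j := j - 1) (x := x) (y := y - 1)
                      (by omega) (by omega) hx0 (by omega)]
                  have e1 : x.toNat = 0 := by omega
                  rw [e1, Nat.choose_zero_right, Nat.choose_zero_right]
                  norm_num
                · rcases eq_or_lt_of_le hy0 with hy1 | hy1
                  · -- y = 0
                    rw [pvF_of_div (i := i) (j := j) hx hy hx0 hy0,
                      pvF_of_div (i := i - 1) (j := j - 2) (x := x - 1) (y := y)
                        (by omega) (by omega) (by omega) hy0,
                      pvF_of_neg (i := i - 2) (j := j - 1) (by right; omega)]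
                    have h1 : (x + y).toNat = x.toNat := by omega
                    have h2 : (x - 1 + y).toNat = (x - 1).toNat := by omega
                    rw [h1, h2, Nat.choose_self, Nat.choose_self]; norm_num
                  · -- x ≥ 1, y ≥ 1
                    rw [pvF_of_div (i := i) (j := j) hx hy hx0 hy0,
                      pvF_of_div (i := i - 1) (j := j - 2) (x := x - 1) (y := y)
                        (by omega) (by omega) (by omega) hy0,
                      pvF_of_div (i := i - 2) (j := j - 1) (x := x) (y := y - 1)
                        (by omega) (by omega) hx0 (by omega)]
                    set a := (x - 1).toNat with ha
                    set b := (y - 1).toNat with hb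
                    have e1 : (x + y).toNat = a + b + 2 := by omega
                    have e2 : x.toNat = a + 1 := by omega
                    have e3 : (x - 1 + y).toNat = a + b + 1 := by omega
                    have e4 : (x + (y - 1)).toNat = a + b + 1 := by omega
                    rw [e1, e2, e3, e4, Nat.choose_succ_succ (a + b + 1) a]
                    push_cast; ring
          · rw [pvF_of_not_div (i := i) (j := j) hd,
              pvF_of_not_div (i := i - 1) (j := j - 2) (by omega),
              pvF_of_not_div (i := i - 2) (j := j - 1) (by omega)]
            simp
        · rw [if_neg hgt]
          unfold pvF
          rw [if_neg (by omega)]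
  exact H ((i + j).toNat + 1) i j (by omega)

-- expected table entry at (p,q) when the scan is about to process cell (i,j)
def pvVal (i j p q : Int) : Int :=
  if 1 < p ∧ 1 < q then (if p < i ∨ (p = i ∧ q < j) then pvG p q else 0)
  else if p = 1 ∧ q = 1 then 1 else 0

def pvInv (n i j : Int) (T : List (List Int)) : Prop :=
  T.length = (n + 1).toNat ∧ (∀ r ∈ T, r.length = (n + 1).toNat) ∧
  ∀ p q : Int, 0 ≤ p → p ≤ n → 0 ≤ q → q ≤ n → pvGet2 T p q = pvVal i j p q

lemma pvG_edge (p q : Int) (h : ¬ (1 < p ∧ 1 < q)) :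
    pvG p q = if p = 1 ∧ q = 1 then 1 else 0 := by
  rw [pvG]
  by_cases h1 : p = 1 ∧ q = 1
  · simp [h1]
  · rw [if_neg h1, if_neg h, if_neg h1]

lemma pvVal_eq_pvG_of_lt (i j p q : Int) (h : p < i) : pvVal i j p q = pvG p q := by
  unfold pvVal
  by_cases h2 : 1 < p ∧ 1 < q
  · rw [if_pos h2, if_pos (Or.inl h)]
  · rw [if_neg h2, pvG_edge p q h2]

lemma pvGet2_pvSet2 (T : List (List Int)) (L : Nat) (i j p q v : Int)
    (hT : T.length = L) (hr : ∀ r ∈ T, r.length = L)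
    (hi : 0 ≤ i) (hi2 : i < (L : Int)) (hj : 0 ≤ j) (_hj2 : j < (L : Int))
    (hp : 0 ≤ p) (hp2 : p < (L : Int)) (hq : 0 ≤ q) (hq2 : q < (L : Int)) :
    pvGet2 (pvSet2 T i j v) p q = if p = i ∧ q = j then v else pvGet2 T p q := by
  have hrowlen : (PySem.List.pyGetD T i []).length = L :=
    hr _ (PySem.List.pyGetD_mem T [] (by simp [PySem.Raise.InRange]; omega))
  unfold pvSet2 pvGet2
  rw [PySem.List.pySetD_of_nonneg _ v hj, PySem.List.pySetD_of_nonneg T _ hi,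
    PySem.List.pyGetD_eq_getElem (T.set i.toNat _) [] hp (by simp; omega),
    List.getElem_set]
  by_cases hpi : p = i
  · rw [if_pos (by omega)]
    rw [PySem.List.pyGetD_eq_getElem _ 0 hq (by simp [hrowlen]; omega), List.getElem_set]
    by_cases hqj : q = j
    · rw [if_pos (by omega), if_pos ⟨hpi, hqj⟩]
    · rw [if_neg (by omega), if_neg (by tauto)]
      subst hpi
      rw [PySem.List.pyGetD_eq_getElem _ 0 hq (by omega)]
  · rw [if_neg (by omega), if_neg (by tauto)]
    rw [PySem.List.pyGetD_eq_getElem T [] hp (by omega)]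

lemma pvSet2_shape (T : List (List Int)) (L : Nat) (i j : Int) (v : Int)
    (hT : T.length = L) (hr : ∀ r ∈ T, r.length = L)
    (hi : 0 ≤ i) (hi2 : i < (L : Int)) (hj : 0 ≤ j) :
    (pvSet2 T i j v).length = L ∧ ∀ r ∈ pvSet2 T i j v, r.length = L := by
  have hrowlen : (PySem.List.pyGetD T i []).length = L :=
    hr _ (PySem.List.pyGetD_mem T [] (by simp [PySem.Raise.InRange]; omega))
  unfold pvSet2
  rw [PySem.List.pySetD_of_nonneg _ v hj, PySem.List.pySetD_of_nonneg T _ hi]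
  refine ⟨by simp [hT], ?_⟩
  intro r hrm
  rcases List.mem_or_eq_of_mem_set hrm with h | h
  · exact hr r h
  · subst h; simp [hrowlen]

lemma foldl_pyRange_ind {σ : Type} (f : σ → Int → σ) (Q : Int → σ → Prop) (b : Int) :
    ∀ (k : Nat) (a : Int) (s : σ), b - a = k →
      (∀ i s, a ≤ i → i < b → Q i s → Q (i + 1) (f s i)) → Q a s →
      Q b ((PySem.List.pyRange a b 1).foldl f s) := by
  intro k
  induction k with
  | zero =>
    intro a s hk _ hQ
    rw [PySem.List.pyRange_one_eq_nil (by omega)]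
    have : b = a := by omega
    subst this; simpa using hQ
  | succ k ih =>
    intro a s hk step hQ
    rw [PySem.List.pyRange_one_cons (by omega)]
    simp only [List.foldl_cons]
    exact ih (a + 1) (f s a) (by omega)
      (fun i s hai hib hQ' => step i s (by omega) hib hQ')
      (step a s le_rfl (by omega) hQ)

lemma pvInner_step (n i j : Int) (T : List (List Int)) (hn : 1 ≤ n)
    (hi : 1 ≤ i) (hi2 : i ≤ n) (hj2 : j < n + 1) (h : pvInv n i j T) :
    pvInv n i (j + 1)
      (if 1 < i ∧ 1 < j then
        pvSet2 T i j (pvGet2 T (i - 1) (j - 2) + pvGet2 T (i - 2) (j - 1))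
      else T) := by
  obtain ⟨hT, hr, hv⟩ := h
  by_cases hc : 1 < i ∧ 1 < j
  · rw [if_pos hc]
    obtain ⟨hci, hcj⟩ := hc
    have hL : ((n + 1).toNat : Int) = n + 1 := by omega
    -- the value written at (i, j) is pvG i j
    have hval : pvGet2 T (i - 1) (j - 2) + pvGet2 T (i - 2) (j - 1) = pvG i j := by
      rw [hv (i - 1) (j - 2) (by omega) (by omega) (by omega) (by omega),
        hv (i - 2) (j - 1) (by omega) (by omega) (by omega) (by omega),
        pvVal_eq_pvG_of_lt i j (i - 1) (j - 2) (by omega),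
        pvVal_eq_pvG_of_lt i j (i - 2) (j - 1) (by omega)]
      conv_rhs => rw [pvG]
      rw [if_neg (by omega), if_pos ⟨hci, hcj⟩]
    obtain ⟨hT', hr'⟩ := pvSet2_shape T _ i j _ hT hr (by omega) (by omega) (by omega)
    refine ⟨hT', hr', ?_⟩
    intro p q hp hp2 hq hq2
    rw [pvGet2_pvSet2 T _ i j p q _ hT hr (by omega) (by omega) (by omega) (by omega)
      (by omega) (by omega) (by omega) (by omega)]
    by_cases hpq : p = i ∧ q = j
    · rw [if_pos hpq, hval]
      obtain ⟨rfl, rfl⟩ := hpq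
      unfold pvVal
      rw [if_pos ⟨hci, hcj⟩, if_pos (by omega)]
    · rw [if_neg hpq, hv p q hp hp2 hq hq2]
      unfold pvVal
      by_cases h2 : 1 < p ∧ 1 < q
      · rw [if_pos h2, if_pos h2]
        exact if_congr (by constructor <;> intro hh <;> omega) rfl rfl
      · rw [if_neg h2, if_neg h2]
  · rw [if_neg hc]
    refine ⟨hT, hr, ?_⟩
    intro p q hp hp2 hq hq2
    rw [hv p q hp hp2 hq hq2]
    unfold pvVal
    by_cases h2 : 1 < p ∧ 1 < q
    · rw [if_pos h2, if_pos h2]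
      exact if_congr (by constructor <;> intro hh <;> omega) rfl rfl
    · rw [if_neg h2, if_neg h2]

lemma pvOuter_step (n i : Int) (T : List (List Int)) (hn : 1 ≤ n)
    (hi : 1 ≤ i) (hi2 : i < n + 1) (h : pvInv n i 1 T) :
    pvInv n (i + 1) 1
      ((PySem.List.pyRange 1 (n + 1) 1).foldl (fun T j =>
        if 1 < i ∧ 1 < j then
          pvSet2 T i j (pvGet2 T (i - 1) (j - 2) + pvGet2 T (i - 2) (j - 1))
        else T) T) := by
  have hinner : pvInv n i (n + 1)
      ((PySem.List.pyRange 1 (n + 1) 1).foldl (fun T j =>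
        if 1 < i ∧ 1 < j then
          pvSet2 T i j (pvGet2 T (i - 1) (j - 2) + pvGet2 T (i - 2) (j - 1))
        else T) T) := by
    refine foldl_pyRange_ind _ (fun j T => pvInv n i j T) (n + 1) n.toNat 1 T (by omega)
      (fun j s _ hj hQ => pvInner_step n i j s hn hi (by omega) hj hQ) h
  obtain ⟨hT, hr, hv⟩ := hinner
  refine ⟨hT, hr, ?_⟩
  intro p q hp hp2 hq hq2
  rw [hv p q hp hp2 hq hq2]
  unfold pvVal
  by_cases h2 : 1 < p ∧ 1 < q
  · rw [if_pos h2, if_pos h2]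
    exact if_congr (by constructor <;> intro hh <;> omega) rfl rfl
  · rw [if_neg h2, if_neg h2]

lemma grid_frog_eq_pvG (n : Int) (hn : 1 ≤ n) : grid_frog n = pvG n n := by
  unfold grid_frog
  set T0 : List (List Int) :=
    (PySem.List.pyRange 0 (n + 1) 1).map
      (fun _ => (PySem.List.pyRange 0 (n + 1) 1).map (fun _ => (0 : Int))) with hT0
  have hT0len : T0.length = (n + 1).toNat := by
    rw [hT0]; simp [PySem.List.length_pyRange_one]
  have hT0rows : ∀ r ∈ T0, r.length = (n + 1).toNat := by
    intro r hrm
    rw [hT0] at hrm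
    obtain ⟨x, _, rfl⟩ := List.mem_map.mp hrm
    simp [PySem.List.length_pyRange_one]
  have hT0get : ∀ p q : Int, 0 ≤ p → p ≤ n → 0 ≤ q → q ≤ n → pvGet2 T0 p q = 0 := by
    intro p q hp hp2 hq hq2
    unfold pvGet2
    rw [hT0, PySem.List.pyGetD_map_pyRange_of_nonneg _ (n + 1) p [] hp (by omega),
      PySem.List.pyGetD_map_pyRange_of_nonneg _ (n + 1) q 0 hq (by omega)]
  have hinit : pvInv n 1 1 (pvSet2 T0 1 1 1) := by
    obtain ⟨h1, h2⟩ := pvSet2_shape T0 _ 1 1 1 hT0len hT0rows (by omega) (by omega) (by omega)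
    refine ⟨h1, h2, ?_⟩
    intro p q hp hp2 hq hq2
    rw [pvGet2_pvSet2 T0 _ 1 1 p q 1 hT0len hT0rows (by omega) (by omega) (by omega)
      (by omega) (by omega) (by omega) (by omega) (by omega)]
    unfold pvVal
    by_cases hpq : p = 1 ∧ q = 1
    · rw [if_pos hpq, if_neg (by omega), if_pos hpq]
    · rw [if_neg hpq, hT0get p q hp hp2 hq hq2]
      by_cases h2' : 1 < p ∧ 1 < q
      · rw [if_pos h2', if_neg (by omega)]
      · rw [if_neg h2', if_neg hpq]
  have hfinal : pvInv n (n + 1) 1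
      ((PySem.List.pyRange 1 (n + 1) 1).foldl (fun T i =>
        (PySem.List.pyRange 1 (n + 1) 1).foldl (fun T j =>
          if 1 < i ∧ 1 < j then
            pvSet2 T i j (pvGet2 T (i - 1) (j - 2) + pvGet2 T (i - 2) (j - 1))
          else T) T) (pvSet2 T0 1 1 1)) := by
    refine foldl_pyRange_ind _ (fun i T => pvInv n i 1 T) (n + 1) n.toNat 1 (pvSet2 T0 1 1 1)
      (by omega) (fun i s hi1 hilt hQ => pvOuter_step n i s hn hi1 hilt hQ) hinit
  obtain ⟨_, _, hv⟩ := hfinal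
  rw [hv n n (by omega) le_rfl (by omega) le_rfl]
  unfold pvVal
  by_cases h2 : 1 < n ∧ 1 < n
  · rw [if_pos h2, if_pos (by omega)]
  · have : n = 1 := by omega
    subst this
    rw [if_neg h2, if_pos ⟨rfl, rfl⟩, pvG]
    simp

lemma grid_frog_alt_eq_pvF (n : Int) (hn : 1 ≤ n) : grid_frog_alt n = pvF n n := by
  unfold grid_frog_alt
  by_cases hd : (3 : Int) ∣ n - 1
  · obtain ⟨x, hx⟩ := hd
    rw [if_neg (not_not_intro (by rw [PySem.Int.mod_eq_zero_iff_dvd]; exact ⟨x, hx⟩))]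
    have hfd : PySem.Int.floordiv (n - 1) 3 = x := by
      rw [PySem.Int.floordiv_eq_ediv_of_pos (by norm_num), hx,
        Int.mul_ediv_cancel_left x (by norm_num)]
    simp only [hfd]
    rw [pvF_of_div (x := x) (y := x) (by omega) (by omega) (by omega) (by omega)]
    have h2x : (2 * x).toNat = (x + x).toNat := by omega
    rw [h2x]
  · rw [if_pos (by rw [Ne, PySem.Int.mod_eq_zero_iff_dvd]; exact hd),
      pvF_of_not_div (by intro h; exact hd (by omega))]

-- ===== VERDICT (by name: the statement is the Claim_ definition above) =====
theorem grid_frog_spec : Claim_equal_grid_frog := by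
  intro n _ hn
  unfold Spec_grid_frog
  rw [grid_frog_eq_pvG n hn, pvG_eq_pvF, grid_frog_alt_eq_pvF n hn]
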